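-- pv_equiv track=rewrite | github.com/prafulnair/Two_Phase_Multi_Way_Merge_Sort | main.py | tpmms
-- ===== SOURCE A (Python) =====
-- def tpmms(sorted_runs):
--     num_runs = len(sorted_runs)
--     group_size = 40  # Number of runs to consider at a time
--     merged_runs = []
--
--     # Iterate over runs in groups of group_size
--     for i in range(0, num_runs, group_size):
--         group_runs = sorted_runs[i:i+group_size]  # Get group of runs
--         group_merged = {}  # Initialize merged group
--
--         # Merge runs within the group
--         for run in group_runs:
--             group_merged.update(run)
--
--         # Sort merged group by employee ID
--         sorted_group = dict(sorted(group_merged.items()))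
--
--         # Append sorted group to merged_runs
--         merged_runs.append(sorted_group)
--
--     # Continue merging until only one sorted sublist remains
--     while len(merged_runs) > 1:
--         next_merged_runs = []
--
--         # Iterate over merged_runs in groups of group_size
--         for i in range(0, len(merged_runs), group_size):
--             group_runs = merged_runs[i:i+group_size]  # Get group of merged runs
--             group_merged = {}  # Initialize merged group
--
--             # Merge runs within the group
--             for run in group_runs:
--                 group_merged.update(run)
--
--             # Sort merged group by employee ID
--             sorted_group = dict(sorted(group_merged.items()))
--
--             # Append sorted group to next_merged_runs
--             next_merged_runs.append(sorted_group)
--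
--         # Update merged_runs with next_merged_runs
--         merged_runs = next_merged_runs
--
--     return merged_runs[0]  # Return the final sorted sublist
-- ===== SOURCE B (Python) =====
-- def tpmms(sorted_runs):
--     # Single pass: fold every run into one dict (later runs overwrite), then sort once.
--     merged = {}
--     for run in sorted_runs:
--         merged.update(run)
--     return dict(sorted(merged.items()))
-- ===== Notes on version B (the rewrite author's own statement) =====
-- stated objective: simpler
-- what changed: Replaces the hierarchical group-of-40 merge passes (each group merged into a dict and sorted separately, repeated level after level) with a single dict-update pass over all runs followed by one final sort.
import Mathlib
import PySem

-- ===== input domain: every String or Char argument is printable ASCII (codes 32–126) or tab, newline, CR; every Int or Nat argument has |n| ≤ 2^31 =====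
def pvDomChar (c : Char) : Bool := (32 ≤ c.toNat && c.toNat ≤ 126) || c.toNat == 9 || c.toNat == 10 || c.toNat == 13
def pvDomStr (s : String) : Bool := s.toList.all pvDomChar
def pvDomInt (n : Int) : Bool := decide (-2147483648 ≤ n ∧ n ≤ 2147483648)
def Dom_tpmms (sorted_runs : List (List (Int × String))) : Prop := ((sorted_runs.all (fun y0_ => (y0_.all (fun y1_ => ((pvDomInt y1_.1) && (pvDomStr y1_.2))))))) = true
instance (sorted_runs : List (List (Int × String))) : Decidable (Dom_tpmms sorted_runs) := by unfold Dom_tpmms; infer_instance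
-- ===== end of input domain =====

-- B replaces A's hierarchical group-of-40 merge passes (each group sorted separately, repeated
-- level after level) by ONE dict-update pass over all runs followed by ONE final sort.

-- ===== PORT A =====
-- one pass of A's while-loop: merge the current dicts in groups of 40, sorting each group
def tpmmsPass (merged_runs : List (PySem.Dict Int String)) : List (PySem.Dict Int String) :=
  (PySem.List.pyRange 0 (merged_runs.length : Int) 40).foldl (fun acc i =>
    let group_runs := PySem.List.slice merged_runs (some i) (some (i + 40))
    let group_merged := group_runs.foldl (fun d run => d.update run.items) PySem.Dict.empty
    acc ++ [PySem.Dict.ofList (PySem.List.sorted2 group_merged.items (fun p => p.1) (fun p => p.2))]) []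

-- termination of A's while-loop: one pass shrinks the list (needed by tpmmsLoop's decreasing_by)
lemma tpmmsPass_length_lt (ds : List (PySem.Dict Int String)) (h : 1 < ds.length) :
    (tpmmsPass ds).length < ds.length := by
  unfold tpmmsPass
  rw [PySem.List.foldl_append_singleton_eq_map]
  rw [PySem.List.pyRange_of_pos 0 (ds.length : Int) (by norm_num)]
  simp only [List.nil_append, List.length_map, List.length_range]
  split_ifs with hlt
  · omega
  · omega

-- A's while-loop
def tpmmsLoop (merged_runs : List (PySem.Dict Int String)) : List (PySem.Dict Int String) :=
  if h : 1 < merged_runs.length then tpmmsLoop (tpmmsPass merged_runs) else merged_runs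
termination_by merged_runs.length
decreasing_by exact tpmmsPass_length_lt _ h

def tpmms (sorted_runs : List (List (Int × String))) : List (Int × String) :=
  let num_runs : Int := (sorted_runs.length : Int)
  -- first phase: merge the runs (lists of pairs) in groups of 40, sorting each group
  let merged_runs : List (PySem.Dict Int String) :=
    (PySem.List.pyRange 0 num_runs 40).foldl (fun acc i =>
      let group_runs := PySem.List.slice sorted_runs (some i) (some (i + 40))
      let group_merged := group_runs.foldl (fun d run => d.update run) PySem.Dict.empty
      acc ++ [PySem.Dict.ofList (PySem.List.sorted2 group_merged.items (fun p => p.1) (fun p => p.2))]) []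
  let final := tpmmsLoop merged_runs
  -- merged_runs[0]: IndexError on the empty list (excluded by Pre_tpmms)
  match final.head? with
  | some d => d.items
  | none => []

-- ===== PORT B =====
def tpmms_alt (sorted_runs : List (List (Int × String))) : List (Int × String) :=
  let merged := sorted_runs.foldl (fun d run => d.update run) PySem.Dict.empty
  (PySem.Dict.ofList (PySem.List.sorted2 merged.items (fun p => p.1) (fun p => p.2))).items

-- ===== PRECONDITION & SPEC =====
-- Pre_ excludes only the empty list, on which A raises IndexError (merged_runs[0]).
def Pre_tpmms (sorted_runs : List (List (Int × String))) : Prop := sorted_runs ≠ []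
instance (sorted_runs : List (List (Int × String))) : Decidable (Pre_tpmms sorted_runs) := by unfold Pre_tpmms; infer_instance

def pvWitness_tpmms : (List (List (Int × String))) := [[(1, "a"), (2, "b")], [(1, "c")]]

def Spec_tpmms (sorted_runs : List (List (Int × String))) (out : List (Int × String)) : Prop := out = tpmms_alt sorted_runs
instance (sorted_runs : List (List (Int × String))) (out : List (Int × String)) : Decidable (Spec_tpmms sorted_runs out) := by unfold Spec_tpmms; infer_instance

-- ===== CLAIM (what is proved, stated in full; the proofs are below) =====
def Claim_equal_tpmms : Prop := ∀ (sorted_runs : List (List (Int × String))), Dom_tpmms sorted_runs → Pre_tpmms sorted_runs → Spec_tpmms sorted_runs (tpmms sorted_runs)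

-- ===== LEMMAS AND PROOFS =====

-- `combOr f l`: the last `some` among `f x` for `x` in `l` — the semantics of Python's
-- "later update wins" accumulation, shared by dict.update chains at every level.
def combOr {β : Type} (f : β → Option String) (l : List β) : Option String :=
  l.foldl (fun o x => (f x).or o) none

lemma foldl_or_init {β : Type} (f : β → Option String) (l : List β) (a : Option String) :
    l.foldl (fun o x => (f x).or o) a = (combOr f l).or a := by
  induction l generalizing a with
  | nil => simp [combOr]
  | cons x l ih =>
    simp only [combOr, List.foldl_cons]
    rw [ih ((f x).or a), ih ((f x).or none), Option.or_none, Option.or_assoc]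

lemma combOr_cons {β : Type} (f : β → Option String) (x : β) (l : List β) :
    combOr f (x :: l) = (combOr f l).or (f x) := by
  rw [combOr, List.foldl_cons, foldl_or_init]
  simp

lemma combOr_append {β : Type} (f : β → Option String) (xs ys : List β) :
    combOr f (xs ++ ys) = (combOr f ys).or (combOr f xs) := by
  simp only [combOr, List.foldl_append]
  exact foldl_or_init f ys (combOr f xs)

lemma combOr_flatten {β : Type} (f : β → Option String) (ls : List (List β)) :
    combOr f ls.flatten = combOr (combOr f) ls := by
  induction ls with
  | nil => rfl
  | cons l ls ih => rw [List.flatten_cons, combOr_append, ih, combOr_cons]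

lemma combOr_map {β γ : Type} (f : γ → Option String) (g : β → γ) (l : List β) :
    combOr f (l.map g) = combOr (fun x => f (g x)) l := by
  simp only [combOr, List.foldl_map]

lemma combOr_congr {β : Type} (f g : β → Option String) (l : List β)
    (h : ∀ x ∈ l, f x = g x) : combOr f l = combOr g l := by
  unfold combOr
  exact PySem.List.foldl_congr_mem l _ _ none (fun acc x hx => by rw [h x hx])

-- lookup step for a single pair
def pairLook (k : Int) (p : Int × String) : Option String := if p.1 = k then some p.2 else none

-- `LL l k`: the value the last pair with key `k` in `l` carries (Python dict-build semantics)
def LL (l : List (Int × String)) (k : Int) : Option String := combOr (pairLook k) l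

lemma get?_update_LL (ps : List (Int × String)) (d : PySem.Dict Int String) (k : Int) :
    (d.update ps).get? k = (LL ps k).or (d.get? k) := by
  induction ps generalizing d with
  | nil => simp [PySem.Dict.update, LL, combOr]
  | cons p ps ih =>
    show ((d.insert p.1 p.2).update ps).get? k = _
    rw [ih]
    simp only [LL, combOr_cons]
    rw [Option.or_assoc, PySem.Dict.get?_insert]
    by_cases h : p.1 = k
    · subst h; simp [pairLook]
    · simp [pairLook, h, Ne.symm h]

lemma get?_ofList_LL (ps : List (Int × String)) (k : Int) :
    (PySem.Dict.ofList ps).get? k = LL ps k := by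
  rw [PySem.Dict.ofList, get?_update_LL, PySem.Dict.get?_empty, Option.or_none]

lemma LL_eq_none_iff (l : List (Int × String)) (k : Int) :
    LL l k = none ↔ k ∉ l.map (·.1) := by
  induction l with
  | nil => simp [LL, combOr]
  | cons p l ih =>
    rw [LL, combOr_cons, Option.or_eq_none_iff]
    simp only [List.map_cons, List.mem_cons, pairLook]
    constructor
    · rintro ⟨h1, h2⟩ (h | h)
      · rw [h] at h2; simp at h2
      · exact (ih.mp h1) h
    · intro h
      refine ⟨ih.mpr (fun hm => h (Or.inr hm)), ?_⟩
      have : p.1 ≠ k := fun he => h (Or.inl he.symm)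
      simp [this]

lemma LL_eq_some_of_mem (l : List (Int × String)) (k : Int) (v : String)
    (hn : (l.map (·.1)).Nodup) (hm : (k, v) ∈ l) : LL l k = some v := by
  induction l with
  | nil => simp at hm
  | cons p l ih =>
    rw [List.map_cons, List.nodup_cons] at hn
    rw [LL, combOr_cons]
    rcases List.mem_cons.mp hm with h | h
    · subst h
      have hk : k ∉ l.map (·.1) := hn.1
      rw [show combOr (pairLook k) l = LL l k from rfl, (LL_eq_none_iff l k).mpr hk,
        Option.none_or, pairLook]
      simp
    · rw [show combOr (pairLook k) l = LL l k from rfl, ih hn.2 h, Option.some_or]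

lemma LL_mem_of_eq_some (l : List (Int × String)) (k : Int) (v : String)
    (h : LL l k = some v) : (k, v) ∈ l := by
  induction l with
  | nil => simp [LL, combOr] at h
  | cons p l ih =>
    rw [LL, combOr_cons] at h
    cases hl : combOr (pairLook k) l with
    | some w =>
      rw [hl, Option.some_or] at h
      exact List.mem_cons_of_mem _ (ih (by rw [LL, hl, h]))
    | none =>
      rw [hl, Option.none_or, pairLook] at h
      split_ifs at h with hk
      · obtain ⟨p1, p2⟩ := p
        obtain rfl : p1 = k := hk
        obtain rfl : p2 = v := Option.some.inj h
        simp

lemma LL_perm (l l' : List (Int × String)) (hp : l.Perm l')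
    (hn : (l.map (·.1)).Nodup) (k : Int) : LL l k = LL l' k := by
  have hn' : (l'.map (·.1)).Nodup := (hp.map (·.1)).nodup_iff.mp hn
  cases h : LL l k with
  | none =>
    rw [LL_eq_none_iff] at h
    exact ((LL_eq_none_iff l' k).mpr (fun hm => h ((hp.map (·.1)).mem_iff.mpr hm))).symm
  | some v =>
    exact (LL_eq_some_of_mem l' k v hn' (hp.mem_iff.mp (LL_mem_of_eq_some l k v h))).symm

lemma LL_items (d : PySem.Dict Int String) (hn : d.keys.Nodup) (k : Int) :
    LL d.items k = d.get? k := by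
  have hkeys : d.keys = d.items.map (·.1) := rfl
  cases h : d.get? k with
  | none =>
    rw [PySem.Dict.get?_eq_none_iff_not_mem_keys, hkeys] at h
    exact (LL_eq_none_iff _ _).mpr h
  | some v =>
    exact LL_eq_some_of_mem _ _ _ (hkeys ▸ hn) (PySem.Dict.mem_items_of_get?_eq_some d h)

-- semantics of a dict.update chain over pair lists
lemma foldl_update_runs_get? (runs : List (List (Int × String))) (d : PySem.Dict Int String) (k : Int) :
    (runs.foldl (fun d r => d.update r) d).get? k = (LL runs.flatten k).or (d.get? k) := by
  induction runs generalizing d with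
  | nil => simp [LL, combOr]
  | cons r runs ih =>
    rw [List.foldl_cons, ih, get?_update_LL]
    simp only [List.flatten_cons, LL, combOr_append]
    rw [Option.or_assoc]

lemma nodup_keys_foldl_update_runs (runs : List (List (Int × String))) :
    ((runs.foldl (fun d r => d.update r) PySem.Dict.empty : PySem.Dict Int String)).keys.Nodup := by
  have : ∀ (d : PySem.Dict Int String), d.keys.Nodup →
      (runs.foldl (fun d r => d.update r) d).keys.Nodup := by
    induction runs with
    | nil => intro d h; exact h
    | cons r runs ih => intro d h; exact ih _ (PySem.Dict.nodup_keys_update d r h)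
  exact this _ PySem.Dict.nodup_keys_empty

-- semantics of a dict.update chain over dicts (A's second phase)
lemma foldl_update_dicts_get? (g : List (PySem.Dict Int String)) (d : PySem.Dict Int String)
    (hg : ∀ e ∈ g, e.keys.Nodup) (k : Int) :
    (g.foldl (fun a e => a.update e.items) d).get? k = (combOr (fun e => e.get? k) g).or (d.get? k) := by
  induction g generalizing d with
  | nil => simp [combOr]
  | cons e g ih =>
    rw [List.foldl_cons, ih _ (fun x hx => hg x (List.mem_cons_of_mem _ hx)), combOr_cons,
      Option.or_assoc, get?_update_LL, LL_items e (hg e List.mem_cons_self) k]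

-- ordering: sorted2 with fst/snd keys is sorted with the lexicographic key
lemma sorted2_eq_sorted_lex (xs : List (Int × String)) :
    PySem.List.sorted2 xs (fun p => p.1) (fun p => p.2) =
      PySem.List.sorted xs (fun p => toLex (p.1, p.2)) := by
  show List.foldl _ [] xs = List.foldl _ [] xs
  have hb : (fun (a b : Int × String) =>
        (decide (a.1 < b.1) || !decide (b.1 < a.1) && decide (a.2 < b.2))) =
      (fun a b => decide (toLex (a.1, a.2) < toLex (b.1, b.2))) := by
    funext a b
    rcases lt_trichotomy a.1 b.1 with h | h | h
    · simp [Prod.Lex.lt_iff, h]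
    · simp [Prod.Lex.lt_iff, h]
    · simp [Prod.Lex.lt_iff, h, not_lt.mpr (le_of_lt h), lt_asymm h, (ne_of_lt h).symm]
  simp only [if_neg (by simp : ¬(false = true))]
  rw [hb]

lemma sorted2_pairwise_fst_lt (xs : List (Int × String)) (hn : (xs.map (·.1)).Nodup) :
    (PySem.List.sorted2 xs (fun p => p.1) (fun p => p.2)).Pairwise (fun a b => a.1 < b.1) := by
  rw [sorted2_eq_sorted_lex]
  have hperm := PySem.List.sorted_perm xs (fun p => toLex (p.1, p.2)) false
  have hnd : ((PySem.List.sorted xs (fun p => toLex (p.1, p.2))).map (·.1)).Nodup :=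
    (hperm.map (·.1)).nodup_iff.mpr hn
  have hne : (PySem.List.sorted xs (fun p => toLex (p.1, p.2))).Pairwise (fun a b => a.1 ≠ b.1) :=
    List.pairwise_map.mp hnd
  have hle := PySem.List.sorted_pairwise xs (fun p => toLex (p.1, p.2))
  exact (hle.and hne).imp (fun {a b} h => by
    rcases Prod.Lex.le_iff.mp h.1 with h' | h'
    · exact h'
    · exact absurd h'.1 h.2)

-- everything A keeps in merged_runs satisfies: unique keys, items strictly sorted by key
def GoodDict (d : PySem.Dict Int String) : Prop :=
  d.keys.Nodup ∧ d.items.Pairwise (fun a b => a.1 < b.1)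

-- dict(sorted(m.items())): items are exactly the sorted2 list, lookups those of m
lemma items_sortDict (m : PySem.Dict Int String) (hn : m.keys.Nodup) :
    (PySem.Dict.ofList (PySem.List.sorted2 m.items (fun p => p.1) (fun p => p.2))).items =
      PySem.List.sorted2 m.items (fun p => p.1) (fun p => p.2) := by
  have hn2 : (List.map (fun p : Int × String => p.1) m.items).Nodup := hn
  have hperm := PySem.List.sorted2_perm m.items (fun p => p.1) (fun p => p.2) false
  have hnd : (List.map (fun p : Int × String => p.1)
      (PySem.List.sorted2 m.items (fun p => p.1) (fun p => p.2))).Nodup :=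
    ((hperm.map (fun p : Int × String => p.1)).nodup_iff).mpr hn2
  have := PySem.Dict.items_foldl_insert_fresh
    (PySem.List.sorted2 m.items (fun p => p.1) (fun p => p.2)) (fun p => p.1) (fun p => p.2)
    PySem.Dict.empty (fun a _ => PySem.Dict.contains_empty a.1) hnd
  simpa [PySem.Dict.ofList, PySem.Dict.update] using this

lemma goodDict_sortDict (m : PySem.Dict Int String) (hn : m.keys.Nodup) :
    GoodDict (PySem.Dict.ofList (PySem.List.sorted2 m.items (fun p => p.1) (fun p => p.2))) := by
  constructor
  · exact PySem.Dict.nodup_keys_ofList _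
  · rw [items_sortDict m hn]
    exact sorted2_pairwise_fst_lt _ hn

lemma get?_sortDict (m : PySem.Dict Int String) (hn : m.keys.Nodup) (k : Int) :
    (PySem.Dict.ofList (PySem.List.sorted2 m.items (fun p => p.1) (fun p => p.2))).get? k =
      m.get? k := by
  have hn2 : (List.map (fun p : Int × String => p.1) m.items).Nodup := hn
  have hperm := PySem.List.sorted2_perm m.items (fun p => p.1) (fun p => p.2) false
  have hnd : (List.map (fun p : Int × String => p.1)
      (PySem.List.sorted2 m.items (fun p => p.1) (fun p => p.2))).Nodup :=
    ((hperm.map (fun p : Int × String => p.1)).nodup_iff).mpr hn2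
  rw [get?_ofList_LL, LL_perm _ m.items hperm hnd, LL_items m hn]

-- chunking: the group-of-40 slices reassemble the list
lemma slice_chunk {α : Type} (xs : List α) (j : Nat) :
    PySem.List.slice xs (some ((40 * j : Nat) : Int)) (some (((40 * j : Nat) : Int) + 40)) =
      (xs.drop (40 * j)).take 40 := by
  have h : ((40 * j : Nat) : Int) + 40 = ((40 * j + 40 : Nat) : Int) := by push_cast; ring
  rw [h, PySem.List.slice_natCast]
  congr 1
  omega

lemma chunks_flatten {α : Type} (xs : List α) :
    (((PySem.List.pyRange 0 (xs.length : Int) 40).map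
      (fun i => PySem.List.slice xs (some i) (some (i + 40))))).flatten = xs := by
  generalize hN : xs.length = N
  induction N using Nat.strong_induction_on generalizing xs with
  | _ N ih =>
    subst hN
    rcases eq_or_ne xs [] with rfl | hne
    · rw [PySem.List.pyRange_of_pos _ _ (by norm_num : (0:Int) < 40)]
      simp
    · have hlen : 0 < xs.length := List.length_pos_iff.mpr hne
      rw [PySem.List.pyRange_of_pos _ _ (by norm_num : (0:Int) < 40),
        if_pos (by exact_mod_cast hlen : (0:Int) < (xs.length : Int))]
      obtain ⟨c, hc'⟩ : ∃ c, (((xs.length : Int) - 0 + 40 - 1) / 40).toNat = c + 1 := by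
        refine ⟨(((xs.length : Int) - 0 + 40 - 1) / 40).toNat - 1, ?_⟩
        have h9 : (1:Int) ≤ ((xs.length : Int) - 0 + 40 - 1) / 40 := by omega
        omega
      rw [hc', List.range_succ_eq_map, List.map_cons, List.map_map, List.map_cons,
        List.map_map, List.flatten_cons]
      simp only [Function.comp_def]
      rw [show (0 : Int) + 40 * ((0:Nat) : Int) = ((40 * 0 : Nat) : Int) from by norm_num]
      rw [slice_chunk]
      have key : ∀ (m : Nat), (((m : Int) - 0 + 40 - 1) / 40).toNat = (m + 39) / 40 := by
        intro m
        omega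
      rw [key] at hc'
      rw [show (fun k : Nat => PySem.List.slice xs (some (0 + 40 * ((k + 1 : Nat) : Int)))
            (some (0 + 40 * ((k + 1 : Nat) : Int) + 40)))
          = (fun k : Nat => PySem.List.slice xs (some ((40 * (k+1) : Nat) : Int))
            (some (((40 * (k+1) : Nat) : Int) + 40))) from by
        funext k; congr 2 <;> push_cast <;> ring]
      by_cases hbig : 40 < xs.length
      · have hylen : (xs.drop 40).length = xs.length - 40 := by simp
        have ihy := ih (xs.drop 40).length (by omega) (xs.drop 40) rfl
        have htail : (List.range c).map
            (fun k : Nat => PySem.List.slice xs (some ((40 * (k+1) : Nat) : Int)) (some (((40 * (k+1) : Nat) : Int) + 40)))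
            = (PySem.List.pyRange 0 (((xs.drop 40).length : Int)) 40).map
              (fun i => PySem.List.slice (xs.drop 40) (some i) (some (i + 40))) := by
          rw [PySem.List.pyRange_of_pos _ _ (by norm_num : (0:Int) < 40),
            if_pos (by rw [hylen]; exact_mod_cast Nat.sub_pos_of_lt hbig)]
          rw [show ((((xs.drop 40).length : Int) - 0 + 40 - 1) / 40).toNat = c from by
            rw [key, hylen]
            omega]
          rw [List.map_map]
          refine List.map_congr_left (fun k _ => ?_)
          simp only [Function.comp_def]
          rw [slice_chunk]
          rw [show (0 : Int) + 40 * (k : Int) = ((40 * k : Nat) : Int) from by push_cast; ring, slice_chunk]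
          rw [List.drop_drop, show 40 + 40 * k = 40 * (k+1) from by ring]
        rw [htail, ihy, Nat.mul_zero, List.drop_zero, List.take_append_drop]
      · have hc0 : c = 0 := by omega
        subst hc0
        simp only [List.range_zero, List.map_nil, List.flatten_nil, List.append_nil,
          Nat.mul_zero, List.drop_zero]
        exact List.take_of_length_le (by omega)

-- one pass of the while-loop in map form
lemma tpmmsPass_eq_map (ds : List (PySem.Dict Int String)) :
    tpmmsPass ds = (PySem.List.pyRange 0 (ds.length : Int) 40).map (fun i =>
      PySem.Dict.ofList (PySem.List.sorted2
        (((PySem.List.slice ds (some i) (some (i + 40))).foldl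
          (fun d run => d.update run.items) PySem.Dict.empty).items)
        (fun p => p.1) (fun p => p.2))) := by
  unfold tpmmsPass
  rw [PySem.List.foldl_append_singleton_eq_map]
  rfl

lemma nodup_keys_foldl_update_dicts (g : List (PySem.Dict Int String)) :
    ((g.foldl (fun a e => a.update e.items) PySem.Dict.empty : PySem.Dict Int String)).keys.Nodup := by
  have : ∀ (d : PySem.Dict Int String), d.keys.Nodup →
      (g.foldl (fun a e => a.update e.items) d).keys.Nodup := by
    induction g with
    | nil => intro d h; exact h
    | cons e g ih => intro d h; exact ih _ (PySem.Dict.nodup_keys_update d e.items h)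
  exact this _ PySem.Dict.nodup_keys_empty

lemma tpmmsPass_good (ds : List (PySem.Dict Int String)) :
    ∀ d ∈ tpmmsPass ds, GoodDict d := by
  rw [tpmmsPass_eq_map]
  intro d hd
  rcases List.mem_map.mp hd with ⟨i, _, rfl⟩
  exact goodDict_sortDict _ (nodup_keys_foldl_update_dicts _)

lemma mem_slice {α : Type} (xs : List α) (a b : Option Int) (x : α)
    (hx : x ∈ PySem.List.slice xs a b) : x ∈ xs := by
  unfold PySem.List.slice at hx
  exact List.mem_of_mem_drop (List.mem_of_mem_take hx)

lemma tpmmsPass_comb (ds : List (PySem.Dict Int String)) (hg : ∀ d ∈ ds, d.keys.Nodup) (k : Int) :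
    combOr (fun d => d.get? k) (tpmmsPass ds) = combOr (fun d => d.get? k) ds := by
  rw [tpmmsPass_eq_map, combOr_map]
  have h1 : ∀ i ∈ PySem.List.pyRange 0 (ds.length : Int) 40,
      (PySem.Dict.ofList (PySem.List.sorted2
        (((PySem.List.slice ds (some i) (some (i + 40))).foldl
          (fun d run => d.update run.items) PySem.Dict.empty).items)
        (fun p => p.1) (fun p => p.2))).get? k =
      combOr (fun d => d.get? k) (PySem.List.slice ds (some i) (some (i + 40))) := by
    intro i _
    rw [get?_sortDict _ (nodup_keys_foldl_update_dicts _),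
      foldl_update_dicts_get? _ _ (fun e he => hg e (mem_slice _ _ _ _ he)),
      PySem.Dict.get?_empty, Option.or_none]
  rw [combOr_congr _ _ _ h1, ← combOr_map (combOr (fun d => d.get? k))
    (fun i => PySem.List.slice ds (some i) (some (i + 40))), ← combOr_flatten, chunks_flatten]

lemma tpmmsPass_ne_nil (ds : List (PySem.Dict Int String)) (h : ds ≠ []) :
    tpmmsPass ds ≠ [] := by
  rw [tpmmsPass_eq_map]
  have hlen : 0 < ds.length := List.length_pos_iff.mpr h
  intro hc
  rw [List.map_eq_nil_iff, PySem.List.pyRange_of_pos 0 (ds.length : Int) (by norm_num),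
    List.map_eq_nil_iff, List.range_eq_nil] at hc
  rw [if_pos (by exact_mod_cast hlen)] at hc
  omega

-- the while-loop returns a single dict with the combined semantics
lemma tpmmsLoop_spec (ds : List (PySem.Dict Int String)) (hne : ds ≠ [])
    (hg : ∀ d ∈ ds, GoodDict d) :
    ∃ d, tpmmsLoop ds = [d] ∧ GoodDict d ∧ ∀ k, d.get? k = combOr (fun e => e.get? k) ds := by
  generalize hN : ds.length = N
  induction N using Nat.strong_induction_on generalizing ds with
  | _ N ih =>
    by_cases h1 : 1 < ds.length
    · obtain ⟨d, hd, hgd, hsem⟩ := ih (tpmmsPass ds).length (hN ▸ tpmmsPass_length_lt ds h1)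
        (tpmmsPass ds) (tpmmsPass_ne_nil ds hne) (tpmmsPass_good ds) rfl
      refine ⟨d, ?_, hgd, ?_⟩
      · rw [tpmmsLoop, dif_pos h1]; exact hd
      · intro k
        rw [hsem k, tpmmsPass_comb ds (fun e he => (hg e he).1) k]
    · obtain ⟨d, hds⟩ : ∃ d, ds = [d] := by
        match ds, hne, h1 with
        | [d], _, _ => exact ⟨d, rfl⟩
        | d :: e :: t, _, h1 => exact absurd (by simp) h1
      refine ⟨d, ?_, hg d (hds ▸ List.mem_cons_self), ?_⟩
      · rw [tpmmsLoop, dif_neg h1, hds]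
      · intro k; rw [hds]; simp [combOr]

-- first-phase dicts in map form
lemma tpmms_phase1_eq_map (L : List (List (Int × String))) :
    ((PySem.List.pyRange 0 ((L.length : Int)) 40).foldl (fun acc i =>
      let group_runs := PySem.List.slice L (some i) (some (i + 40))
      let group_merged := group_runs.foldl (fun d run => d.update run) PySem.Dict.empty
      acc ++ [PySem.Dict.ofList (PySem.List.sorted2 group_merged.items (fun p => p.1) (fun p => p.2))]) []) =
    (PySem.List.pyRange 0 ((L.length : Int)) 40).map (fun i =>
      PySem.Dict.ofList (PySem.List.sorted2
        (((PySem.List.slice L (some i) (some (i + 40))).foldl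
          (fun d run => d.update run) PySem.Dict.empty).items)
        (fun p => p.1) (fun p => p.2))) := by
  rw [PySem.List.foldl_append_singleton_eq_map]
  rfl

theorem tpmms_spec : Claim_equal_tpmms := by
  unfold Claim_equal_tpmms
  intro L _ hpre
  show tpmms L = tpmms_alt L
  have hBnodup := nodup_keys_foldl_update_runs L
  have hBitems : tpmms_alt L = PySem.List.sorted2
      ((L.foldl (fun d run => d.update run) PySem.Dict.empty).items) (fun p => p.1) (fun p => p.2) :=
    items_sortDict _ hBnodup
  have htp : tpmms L = (match (tpmmsLoop ((PySem.List.pyRange 0 ((L.length : Int)) 40).map (fun i =>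
      PySem.Dict.ofList (PySem.List.sorted2
        (((PySem.List.slice L (some i) (some (i + 40))).foldl
          (fun d run => d.update run) PySem.Dict.empty).items)
        (fun p => p.1) (fun p => p.2))))).head? with
      | some d => d.items
      | none => []) := by
    simp only [tpmms]
    rw [tpmms_phase1_eq_map]
  have hMAgood : ∀ d ∈ (PySem.List.pyRange 0 ((L.length : Int)) 40).map (fun i =>
      PySem.Dict.ofList (PySem.List.sorted2
        (((PySem.List.slice L (some i) (some (i + 40))).foldl
          (fun d run => d.update run) PySem.Dict.empty).items)
        (fun p => p.1) (fun p => p.2))), GoodDict d := by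
    intro d hd
    rcases List.mem_map.mp hd with ⟨i, _, rfl⟩
    exact goodDict_sortDict _ (nodup_keys_foldl_update_runs _)
  have hMAne : (PySem.List.pyRange 0 ((L.length : Int)) 40).map (fun i =>
      PySem.Dict.ofList (PySem.List.sorted2
        (((PySem.List.slice L (some i) (some (i + 40))).foldl
          (fun d run => d.update run) PySem.Dict.empty).items)
        (fun p => p.1) (fun p => p.2))) ≠ [] := by
    have hlen : 0 < L.length := List.length_pos_iff.mpr hpre
    intro hc
    rw [List.map_eq_nil_iff, PySem.List.pyRange_of_pos 0 ((L.length : Int)) (by norm_num),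
      List.map_eq_nil_iff, List.range_eq_nil] at hc
    rw [if_pos (by exact_mod_cast hlen)] at hc
    omega
  obtain ⟨d, hd1, hd2, hd3⟩ := tpmmsLoop_spec _ hMAne hMAgood
  have hsem : ∀ k, d.get? k =
      (L.foldl (fun d run => d.update run) PySem.Dict.empty).get? k := by
    intro k
    rw [hd3 k, foldl_update_runs_get?, PySem.Dict.get?_empty, Option.or_none, LL, combOr_flatten]
    have h1 : ∀ i ∈ PySem.List.pyRange 0 ((L.length : Int)) 40,
        (PySem.Dict.ofList (PySem.List.sorted2
          (((PySem.List.slice L (some i) (some (i + 40))).foldl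
            (fun d run => d.update run) PySem.Dict.empty).items)
          (fun p => p.1) (fun p => p.2))).get? k =
        combOr (combOr (pairLook k)) (PySem.List.slice L (some i) (some (i + 40))) := by
      intro i _
      rw [get?_sortDict _ (nodup_keys_foldl_update_runs _), foldl_update_runs_get?,
        PySem.Dict.get?_empty, Option.or_none, LL, combOr_flatten]
    rw [combOr_map, combOr_congr _ _ _ h1,
      ← combOr_map (combOr (combOr (pairLook k))) (fun i => PySem.List.slice L (some i) (some (i + 40))),
      ← combOr_flatten, chunks_flatten]
  have hnd1 : d.items.Nodup := List.Nodup.of_map (fun p : Int × String => p.1) hd2.1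
  have hnd2 : (L.foldl (fun d run => d.update run) PySem.Dict.empty).items.Nodup :=
    List.Nodup.of_map (fun p : Int × String => p.1) hBnodup
  have hperm : d.items.Perm (L.foldl (fun d run => d.update run) PySem.Dict.empty).items := by
    rw [List.perm_ext_iff_of_nodup hnd1 hnd2]
    intro p
    obtain ⟨a, b⟩ := p
    rw [← PySem.Dict.get?_eq_some_iff_mem_items _ _ _ hd2.1,
      ← PySem.Dict.get?_eq_some_iff_mem_items _ _ _ hBnodup, hsem a]
  rw [htp, hd1, hBitems, sorted2_eq_sorted_lex]
  exact (PySem.List.sorted_eq_of_perm_of_pairwise_lt _ d.items _ hperm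
    (hd2.2.imp (fun h => Prod.Lex.lt_iff.mpr (Or.inl h)))).symm
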